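-- pv_equiv track=rewrite | github.com/rei-kaji/wmad-class | assignment7/problem4.py | function
-- ===== SOURCE A (Python) =====
-- def function(list1):
--     if len(list1) >= 4:
--         while True:
--             for size in range(4, len(list1)):
--                 for startIndex in range(len(list1)-size):
--                     subList = list1[startIndex:startIndex+size]
--                     if subList == sorted(subList) or subList == sorted(subList, reverse=True):
--                         return subList
--
--             return None
--
--     else:
--         return None
-- ===== SOURCE B (Python) =====
-- def function(list1):
--     # Sliding pass: a monotonic sublist of length >= 4 exists iff some
--     # contiguous 4-window is monotonic, so only 4-windows need checking.
--     while len(list1) >= 4: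
--         a, b, c, d = list1[0], list1[1], list1[2], list1[3]
--         if a <= b <= c <= d or a >= b >= c >= d:
--             return [a, b, c, d]
--         list1 = list1[1:]
--     return None
-- ===== Notes on version B (the rewrite author's own statement) =====
-- stated objective: alternative
-- what changed: Replaced the nested size/start scan that sorts every slice with a single sliding pass that checks each contiguous 4-window for monotonicity by direct comparisons (larger windows are provably redundant); B also checks the last 4-window, which A's off-by-one ranges skip.
-- intended difference: On lists whose only monotonic 4-window is the final one (start len-4, including every monotonic list of length exactly 4), A returns None because range(4, len) and range(len-size) each stop one short of the end, while B returns that last 4-window, the intended first monotonic length-4 sublist. — e.g. on function([1, 2, 3, 4]): A returns none, B returns some [1, 2, 3, 4]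
import Mathlib
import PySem

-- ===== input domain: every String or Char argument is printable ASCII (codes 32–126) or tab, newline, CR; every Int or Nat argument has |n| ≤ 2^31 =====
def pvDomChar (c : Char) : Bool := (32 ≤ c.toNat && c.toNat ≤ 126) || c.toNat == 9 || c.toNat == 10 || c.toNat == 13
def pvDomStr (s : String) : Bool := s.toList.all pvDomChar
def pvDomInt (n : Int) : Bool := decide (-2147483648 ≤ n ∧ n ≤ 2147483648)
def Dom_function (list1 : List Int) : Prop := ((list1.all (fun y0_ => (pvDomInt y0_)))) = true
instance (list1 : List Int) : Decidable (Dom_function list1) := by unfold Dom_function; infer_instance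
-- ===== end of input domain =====

-- B replaces A's nested size/start scan (which sorts every slice) with a single sliding
-- pass over the 4-windows; B also checks the final 4-window, which A's ranges skip (see D_function).

-- ===== PORT A =====
-- inner 'for startIndex in …' loop: first slice equal to its sorted (or reverse-sorted) copy
def innerA (list1 : List Int) (size : Int) : List Int → Option (List Int)
  | [] => none
  | s :: rest =>
    let subList := PySem.List.slice list1 (some s) (some (s + size))
    if subList = PySem.List.sorted subList (fun x => x) false ∨
       subList = PySem.List.sorted subList (fun x => x) true
    then some subList
    else innerA list1 size rest

-- outer 'for size in …' loop
def outerA (list1 : List Int) : List Int → Option (List Int)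
  | [] => none
  | size :: rest =>
    match innerA list1 size (PySem.List.pyRange 0 ((list1.length : Int) - size) 1) with
    | some r => some r
    | none => outerA list1 rest

def function (list1 : List Int) : Option (List Int) :=
  if (list1.length : Int) ≥ 4 then
    outerA list1 (PySem.List.pyRange 4 (list1.length : Int) 1)
  else none

-- ===== PORT B =====
def function_alt (list1 : List Int) : Option (List Int) :=
  match list1 with
  | a :: b :: c :: d :: rest =>
    if (a ≤ b ∧ b ≤ c ∧ c ≤ d) ∨ (a ≥ b ∧ b ≥ c ∧ c ≥ d) then some [a, b, c, d]
    else function_alt (b :: c :: d :: rest)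
  | _ => none

-- ===== PRECONDITION & SPEC =====
-- the 4-window of list1 starting at i is monotone (nondecreasing or nonincreasing)
abbrev monoAt (l : List Int) (i : Nat) : Prop :=
  ((l.drop i).take 4).Pairwise (· ≤ ·) ∨ ((l.drop i).take 4).Pairwise (fun a b => b ≤ a)

-- On lists whose only monotonic 4-window is the final one (start len-4, including every
-- monotonic list of length exactly 4), A returns None because range(4, len) and
-- range(len-size) each stop one short of the end, while B returns that last 4-window,
-- the intended first monotonic length-4 sublist.
def D_function (list1 : List Int) : Prop :=
  4 ≤ list1.length ∧ (∀ i, i < list1.length - 4 → ¬ monoAt list1 i) ∧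
    monoAt list1 (list1.length - 4)
instance (list1 : List Int) : Decidable (D_function list1) := by unfold D_function; infer_instance

def Spec_function (list1 : List Int) (out : Option (List Int)) : Prop :=
  ¬ D_function list1 → out = function_alt list1
instance (list1 : List Int) (out : Option (List Int)) : Decidable (Spec_function list1 out) := by unfold Spec_function; infer_instance

def pvDiffWitness_function : List Int := [1, 2, 3, 4]
def pvDiffWitnessOut_function : (Option (List Int)) × (Option (List Int)) :=
  (none, some [1, 2, 3, 4])

-- ===== CLAIM (what is proved, stated in full; the proofs are below) =====
def Claim_unchanged_function : Prop := ∀ (list1 : List Int), Dom_function list1 → Spec_function list1 (function list1)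
def Claim_changed_function : Prop := Dom_function (pvDiffWitness_function) ∧ D_function (pvDiffWitness_function) ∧ function (pvDiffWitness_function) = pvDiffWitnessOut_function.1 ∧ function_alt (pvDiffWitness_function) = pvDiffWitnessOut_function.2 ∧ pvDiffWitnessOut_function.1 ≠ pvDiffWitnessOut_function.2
def Claim_exact_function : Prop := ∀ (list1 : List Int), Dom_function list1 → D_function list1 → function list1 ≠ function_alt list1

-- ===== LEMMAS AND PROOFS =====

-- A's monotonicity test by sorting, characterised by Pairwise
lemma mono_iff (sub : List Int) :
    (sub = PySem.List.sorted sub (fun x => x) false ∨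
     sub = PySem.List.sorted sub (fun x => x) true) ↔
    (sub.Pairwise (· ≤ ·) ∨ sub.Pairwise (fun a b => b ≤ a)) := by
  constructor
  · rintro (h | h)
    · left; rw [h]; simpa using PySem.List.sorted_pairwise sub (fun x => x)
    · right; rw [h]; simpa using PySem.List.sorted_pairwise_rev sub (fun x => x)
  · rintro (h | h)
    · left; exact (PySem.List.sorted_eq_self_of_pairwise sub (fun x => x) (by simpa using h)).symm
    · right; exact (PySem.List.sorted_rev_eq_self_of_pairwise sub (fun x => x) (by simpa using h)).symm

lemma mono4_iff (a b c d : Int) (t : List Int) :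
    monoAt (a :: b :: c :: d :: t) 0 ↔
      ((a ≤ b ∧ b ≤ c ∧ c ≤ d) ∨ (a ≥ b ∧ b ≥ c ∧ c ≥ d)) := by
  simp [monoAt, List.pairwise_cons]
  omega

-- ---- B side ----
lemma exists4 (l : List Int) (h : 4 ≤ l.length) :
    ∃ a b c d t, l = a :: b :: c :: d :: t := by
  rcases l with _ | ⟨a, _ | ⟨b, _ | ⟨c, _ | ⟨d, t⟩⟩⟩⟩ <;> simp at h
  exact ⟨a, b, c, d, t, rfl⟩

lemma alt_none (l : List Int) (h : ∀ i, i + 4 ≤ l.length → ¬ monoAt l i) :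
    function_alt l = none := by
  induction l with
  | nil => rfl
  | cons a t ih =>
    match t with
    | [] => rfl
    | [b] => rfl
    | [b, c] => rfl
    | b :: c :: d :: rest =>
      rw [function_alt, if_neg]
      · exact ih (fun i hi => by
          have := h (i + 1) (by simp only [List.length_cons] at hi ⊢; omega)
          simpa [monoAt] using this)
      · intro hc
        exact h 0 (by simp only [List.length_cons]; omega) ((mono4_iff a b c d rest).mpr hc)

lemma alt_some (i0 : Nat) (l : List Int) (h4 : i0 + 4 ≤ l.length)
    (hm : monoAt l i0) (hmin : ∀ j, j < i0 → ¬ monoAt l j) :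
    function_alt l = some ((l.drop i0).take 4) := by
  induction i0 generalizing l with
  | zero =>
    obtain ⟨a, b, c, d, rest, rfl⟩ := exists4 l (by omega)
    rw [function_alt, if_pos ((mono4_iff a b c d rest).mp hm)]
    rfl
  | succ k ih =>
    obtain ⟨a, b, c, d, rest, rfl⟩ := exists4 l (by omega)
    rw [function_alt, if_neg]
    · have h4' : k + 4 ≤ (b :: c :: d :: rest).length := by
        simp only [List.length_cons] at h4 ⊢; omega
      exact ih (b :: c :: d :: rest) h4' (by simpa [monoAt] using hm)
        (fun j hj => by
          have := hmin (j + 1) (by omega)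
          simpa [monoAt] using this)
    · intro hc
      exact hmin 0 (Nat.succ_pos k) ((mono4_iff a b c d rest).mpr hc)

-- ---- A side ----
-- if no 4-window strictly before the last is monotone, no window of size ≥ 4 that A scans is
lemma no_big (l : List Int) (H : ∀ i, i + 4 < l.length → ¬ monoAt l i)
    (j s : Nat) (hs : 4 ≤ s) (hjs : j + s < l.length) :
    ¬ (((l.drop j).take s).Pairwise (· ≤ ·) ∨
       ((l.drop j).take s).Pairwise (fun a b => b ≤ a)) := by
  have h4 : (l.drop j).take 4 = ((l.drop j).take s).take 4 := by
    rw [List.take_take]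
    congr 1
    omega
  intro h
  apply H j (by omega)
  cases h with
  | inl h => exact Or.inl (h4 ▸ h.sublist (List.take_sublist _ _))
  | inr h => exact Or.inr (h4 ▸ h.sublist (List.take_sublist _ _))

lemma innerA_none (l : List Int) (size : Int) (starts : List Int)
    (h : ∀ s ∈ starts,
      ¬ (PySem.List.slice l (some s) (some (s + size)) =
           PySem.List.sorted (PySem.List.slice l (some s) (some (s + size))) (fun x => x) false ∨
         PySem.List.slice l (some s) (some (s + size)) =
           PySem.List.sorted (PySem.List.slice l (some s) (some (s + size))) (fun x => x) true)) :
    innerA l size starts = none := by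
  induction starts with
  | nil => rfl
  | cons s rest ih =>
    simp only [innerA]
    rw [if_neg (h s (List.mem_cons_self ..))]
    exact ih (fun x hx => h x (List.mem_cons_of_mem _ hx))

lemma outerA_none (l : List Int) (sizes : List Int)
    (h : ∀ sz ∈ sizes, innerA l sz (PySem.List.pyRange 0 ((l.length : Int) - sz) 1) = none) :
    outerA l sizes = none := by
  induction sizes with
  | nil => rfl
  | cons sz rest ih =>
    rw [outerA, h sz (List.mem_cons_self ..)]
    exact ih (fun x hx => h x (List.mem_cons_of_mem _ hx))

lemma A_none (l : List Int) (h4 : 4 ≤ l.length)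
    (H : ∀ i, i + 4 < l.length → ¬ monoAt l i) : function l = none := by
  unfold function
  rw [if_pos (by exact_mod_cast h4), outerA_none]
  intro sz hsz
  obtain ⟨hsz4, hszlt⟩ := (PySem.List.mem_pyRange_one).mp hsz
  apply innerA_none
  intro s hs
  obtain ⟨hs0, hslt⟩ := (PySem.List.mem_pyRange_one).mp hs
  obtain ⟨sn, rfl⟩ := Int.eq_ofNat_of_zero_le hs0
  obtain ⟨szn, rfl⟩ := Int.eq_ofNat_of_zero_le (by omega : (0:Int) ≤ sz)
  rw [show ((sn : Int) + (szn : Int)) = (((sn + szn : Nat) : Int)) by push_cast; ring]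
  rw [PySem.List.slice_natCast]
  rw [show sn + szn - sn = szn by omega]
  rw [mono_iff]
  exact no_big l H sn szn (by exact_mod_cast hsz4) (by omega)

lemma innerA_first (l : List Int) (a b i0 : Int) (ha : a ≤ i0) (hb : i0 < b)
    (hc : PySem.List.slice l (some i0) (some (i0 + 4)) =
            PySem.List.sorted (PySem.List.slice l (some i0) (some (i0 + 4))) (fun x => x) false ∨
          PySem.List.slice l (some i0) (some (i0 + 4)) =
            PySem.List.sorted (PySem.List.slice l (some i0) (some (i0 + 4))) (fun x => x) true)
    (hmin : ∀ j, a ≤ j → j < i0 →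
      ¬ (PySem.List.slice l (some j) (some (j + 4)) =
           PySem.List.sorted (PySem.List.slice l (some j) (some (j + 4))) (fun x => x) false ∨
         PySem.List.slice l (some j) (some (j + 4)) =
           PySem.List.sorted (PySem.List.slice l (some j) (some (j + 4))) (fun x => x) true)) :
    innerA l 4 (PySem.List.pyRange a b 1) = some (PySem.List.slice l (some i0) (some (i0 + 4))) := by
  induction hk : (i0 - a).toNat generalizing a with
  | zero =>
    have : a = i0 := by omega
    subst this
    rw [PySem.List.pyRange_one_cons (by omega)]
    simp only [innerA]
    rw [if_pos hc]
  | succ k ih =>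
    rw [PySem.List.pyRange_one_cons (by omega)]
    simp only [innerA]
    rw [if_neg (hmin a le_rfl (by omega))]
    exact ih (a + 1) (by omega) (fun j hj => hmin j (by omega)) (by omega)

-- cast bridge: A's slice condition at a Nat start equals monoAt
lemma cond_iff (l : List Int) (j : Nat) :
    (PySem.List.slice l (some (j : Int)) (some ((j : Int) + 4)) =
       PySem.List.sorted (PySem.List.slice l (some (j : Int)) (some ((j : Int) + 4))) (fun x => x) false ∨
     PySem.List.slice l (some (j : Int)) (some ((j : Int) + 4)) =
       PySem.List.sorted (PySem.List.slice l (some (j : Int)) (some ((j : Int) + 4))) (fun x => x) true) ↔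
    monoAt l j := by
  rw [show ((j : Int) + 4) = (((j + 4 : Nat) : Int)) by push_cast; ring]
  rw [PySem.List.slice_natCast, show j + 4 - j = 4 by omega, mono_iff]

-- ===== VERDICT (by name: the statement is the Claim_ definition above) =====
theorem function_spec : Claim_unchanged_function := by
  intro l _ hnD
  by_cases h4 : 4 ≤ l.length
  · by_cases hex : ∃ i, i + 4 ≤ l.length ∧ monoAt l i
    · have hP := Nat.find_spec hex
      set i0 := Nat.find hex with hi0def
      have hmin : ∀ j, j < i0 → ¬ (j + 4 ≤ l.length ∧ monoAt l j) :=
        fun j hj => Nat.find_min hex hj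
      by_cases hlast : i0 + 4 = l.length
      · exfalso
        apply hnD
        refine ⟨h4, ?_, ?_⟩
        · intro i hi hm
          exact hmin i (by omega) ⟨by omega, hm⟩
        · have : l.length - 4 = i0 := by omega
          rw [this]; exact hP.2
      · have hi0lt : i0 + 4 < l.length := lt_of_le_of_ne hP.1 hlast
        have hB : function_alt l = some ((l.drop i0).take 4) :=
          alt_some i0 l hP.1 hP.2 (fun j hj hm => hmin j hj ⟨by omega, hm⟩)
        have hA : function l = some ((l.drop i0).take 4) := by
          unfold function
          rw [if_pos (by exact_mod_cast h4)]
          have h5 : (5 : Int) ≤ (l.length : Int) := by exact_mod_cast (by omega : 5 ≤ l.length)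
          rw [PySem.List.pyRange_one_cons (by omega), outerA]
          have hfirst := innerA_first l 0 ((l.length : Int) - 4) (i0 : Int)
            (by exact_mod_cast Nat.zero_le i0) (by omega)
            ((cond_iff l i0).mpr hP.2)
            (fun j hj0 hji => by
              obtain ⟨jn, rfl⟩ := Int.eq_ofNat_of_zero_le hj0
              rw [cond_iff]
              exact fun hm => hmin jn (by exact_mod_cast hji) ⟨by omega, hm⟩)
          rw [hfirst]
          rw [show ((i0 : Int) + 4) = (((i0 + 4 : Nat) : Int)) by push_cast; ring,
            PySem.List.slice_natCast, show i0 + 4 - i0 = 4 by omega]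
        rw [hA, hB]
    · have hex' : ∀ i, i + 4 ≤ l.length → ¬ monoAt l i :=
        fun i hi hm => hex ⟨i, hi, hm⟩
      rw [A_none l h4 (fun i hi => hex' i (by omega)), alt_none l hex']
  · have hA : function l = none := by
      unfold function
      rw [if_neg]
      intro hge
      exact h4 (by exact_mod_cast hge)
    rw [hA, alt_none l (fun i hi => absurd hi (by omega))]

theorem function_changed : Claim_changed_function := by unfold Claim_changed_function; decide

theorem function_tight : Claim_exact_function := by
  intro l _ hD
  obtain ⟨h4, hall, hlast⟩ := hD
  have hA : function l = none := A_none l h4 (fun i hi => hall i (by omega))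
  have hB : function_alt l = some ((l.drop (l.length - 4)).take 4) :=
    alt_some (l.length - 4) l (by omega) hlast (fun j hj => hall j hj)
  rw [hA, hB]
  simp
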